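-- pv_equiv track=rewrite | github.com/smitkesaria/tricopter | tricopter_py/tricopter_py/crsf.py | crc8_dvb_s2
-- ===== SOURCE A (Python) =====
-- def crc8_dvb_s2(crc, a) -> int:
--   crc = crc ^ a
--   for ii in range(8):
--     if crc & 0x80:
--       crc = (crc << 1) ^ 0xD5
--     else:
--       crc = crc << 1
--   return crc & 0xFF
-- ===== SOURCE B (Python) =====
-- # Table-driven CRC8/DVB-S2: the 8-iteration bit loop is run once per byte at
-- # module load to build a 256-entry table; the function itself is a single lookup.
-- def _crc8_byte(b):
--     crc = b
--     for _ in range(8):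
--         crc = ((crc << 1) ^ 0xD5) if crc & 0x80 else (crc << 1)
--     return crc & 0xFF
--
-- CRC8_TABLE = [_crc8_byte(b) for b in range(256)]
--
-- def crc8_dvb_s2(crc, a):
--     return CRC8_TABLE[(crc ^ a) & 0xFF]
-- ===== Notes on version B (the rewrite author's own statement) =====
-- stated objective: faster
-- what changed: The per-call 8-iteration shift/xor bit loop is replaced by a single lookup into a 256-entry table precomputed once at module load, indexed by (crc ^ a) & 0xFF (only the low 8 bits of crc ^ a ever affect the result).
import Mathlib
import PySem

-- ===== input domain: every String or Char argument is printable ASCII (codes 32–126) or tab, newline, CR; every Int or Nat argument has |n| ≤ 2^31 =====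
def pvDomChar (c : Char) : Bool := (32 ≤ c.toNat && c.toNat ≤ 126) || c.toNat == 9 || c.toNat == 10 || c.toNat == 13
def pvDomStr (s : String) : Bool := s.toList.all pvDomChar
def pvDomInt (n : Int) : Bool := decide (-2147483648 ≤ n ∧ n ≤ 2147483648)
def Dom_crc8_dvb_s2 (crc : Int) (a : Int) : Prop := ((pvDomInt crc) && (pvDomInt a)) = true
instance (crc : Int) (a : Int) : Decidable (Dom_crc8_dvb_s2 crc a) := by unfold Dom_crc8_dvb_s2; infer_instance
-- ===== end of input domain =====

set_option maxRecDepth 40000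


-- B replaces A's per-call 8-iteration bit loop by one lookup in a 256-entry table built once at module load (objective: faster, constant factor).

-- ===== PORT A =====
-- literal transliteration: crc = crc ^ a; 8 iterations shifting and xoring 0xD5 when bit 7 is set; return crc & 0xFF
def crc8_dvb_s2 (crc : Int) (a : Int) : Int :=
  let crc1 := PySem.Int.bxor crc a
  let crc2 := (List.range 8).foldl
    (fun c _ => if PySem.Int.band c 0x80 ≠ 0 then PySem.Int.bxor (c <<< (1:Nat)) 0xD5 else c <<< (1:Nat)) crc1
  PySem.Int.band crc2 0xFF

-- ===== PORT B =====
-- _crc8_byte from Source B: the bit loop run once on a byte value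
def pvCrc8Byte (b : Nat) : Int :=
  let crc := (List.range 8).foldl
    (fun c _ => if PySem.Int.band c 0x80 ≠ 0 then PySem.Int.bxor (c <<< (1:Nat)) 0xD5 else c <<< (1:Nat)) (Int.ofNat b)
  PySem.Int.band crc 0xFF

-- CRC8_TABLE from Source B, built once at module level
def pvCrc8Table : List Int := (List.range 256).map pvCrc8Byte

-- the lookup CRC8_TABLE[(crc ^ a) & 0xFF]; the index is always in [0, 255], so plain getD is an exact port of the Python indexing
def crc8_dvb_s2_alt (crc : Int) (a : Int) : Int :=
  pvCrc8Table.getD (PySem.Int.band (PySem.Int.bxor crc a) 0xFF).toNat 0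

-- ===== PRECONDITION & SPEC =====
def Spec_crc8_dvb_s2 (crc : Int) (a : Int) (out : Int) : Prop := out = crc8_dvb_s2_alt crc a
instance (crc : Int) (a : Int) (out : Int) : Decidable (Spec_crc8_dvb_s2 crc a out) := by unfold Spec_crc8_dvb_s2; infer_instance

-- ===== CLAIM (what is proved, stated in full; the proofs are below) =====
def Claim_equal_crc8_dvb_s2 : Prop := ∀ (crc : Int) (a : Int), Dom_crc8_dvb_s2 crc a → Spec_crc8_dvb_s2 crc a (crc8_dvb_s2 crc a)

-- ===== LEMMAS AND PROOFS =====

-- one iteration of the bit loop, as written in both ports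
def pvStep (c : Int) : Int :=
  if PySem.Int.band c 0x80 ≠ 0 then PySem.Int.bxor (c <<< (1:Nat)) 0xD5 else c <<< (1:Nat)

-- the same iteration on the low byte, as a Nat function
def pvStepN (m : Nat) : Nat :=
  if m &&& 128 ≠ 0 then (2 * m) % 256 ^^^ 213 else (2 * m) % 256

theorem pv_and255 (n : Nat) : n &&& 255 = n % 256 := by
  have := Nat.and_two_pow_sub_one_eq_mod n 8
  norm_num at this; exact this

theorem pv_and128_mod (n : Nat) : n &&& 128 = n % 256 &&& 128 := by
  have h1 : (n &&& 128) % 256 = n % 256 &&& 128 % 256 := Nat.and_mod_two_pow (n := 8)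
  have h2 : n &&& 128 ≤ 128 := Nat.and_le_right
  rw [Nat.mod_eq_of_lt (by omega)] at h1
  simpa using h1

theorem pv_xor213_mod (n : Nat) : (n ^^^ 213) % 256 = n % 256 ^^^ 213 := by
  have h1 : (n ^^^ 213) % 256 = n % 256 ^^^ 213 % 256 := Nat.xor_mod_two_pow (n := 8)
  simpa using h1

theorem pv_band255 (x : Int) : PySem.Int.band x 255 = x.emod 256 := by
  cases x with
  | ofNat n =>
    simp [PySem.Int.band, pv_and255]
    change _ = (n : Int) % 256
    omega
  | negSucc n =>
    rw [PySem.Int.band, if_neg (by simp [Int.negSucc_eq]; omega), if_pos (by norm_num)]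
    have h1 : (-(Int.negSucc n) - 1).toNat = n := by simp [Int.negSucc_eq]
    have h2 : (255 : Int).toNat = 255 := rfl
    rw [h1, h2, Nat.and_comm, pv_and255]
    have h : n % 256 < 256 := Nat.mod_lt _ (by norm_num)
    have h3 : (Int.negSucc n).emod 256 = 255 - (n % 256 : Nat) := by
      change (-(n + 1) : Int) % 256 = _
      push_cast
      omega
    rw [h3]
    push_cast
    omega

theorem pv_posKey : ∀ m : Fin 256,
    (if m.val &&& 128 ≠ 0 then (2 * m.val) % 256 ^^^ 213 else (2 * m.val) % 256) = pvStepN m.val := by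
  decide

theorem pv_negKey : ∀ m : Fin 256,
    (if 128 - (128 &&& m.val) ≠ 0 then 255 - ((2 * m.val + 1) % 256 ^^^ 213) else 255 - (2 * m.val + 1) % 256)
      = pvStepN (255 - m.val) := by
  decide

theorem pv_step_emod (c : Int) : ((pvStep c).emod 256).toNat = pvStepN ((c.emod 256).toNat) := by
  cases c with
  | ofNat n =>
    have hm : ((Int.ofNat n).emod 256).toNat = n % 256 := by
      change (((n : Nat) : Int) % 256).toNat = _; omega
    have hcond : PySem.Int.band (Int.ofNat n) 0x80 = Int.ofNat (n &&& 128) := by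
      simp [PySem.Int.band]
    have hshift : (Int.ofNat n) <<< (1:Nat) = Int.ofNat (2 * n) := by
      rw [Int.shiftLeft_eq]; norm_num; omega
    have hxor : PySem.Int.bxor (Int.ofNat (2 * n)) 0xD5 = Int.ofNat (2 * n ^^^ 213) := by
      simp [PySem.Int.bxor]; omega
    have key : (if (n % 256) &&& 128 ≠ 0 then (2 * (n % 256)) % 256 ^^^ 213 else (2 * (n % 256)) % 256)
        = pvStepN (n % 256) := pv_posKey ⟨n % 256, Nat.mod_lt _ (by norm_num)⟩
    rw [hm, pvStep, hcond, hshift]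
    by_cases hb : n &&& 128 = 0
    · rw [if_neg (by simpa using hb)]
      rw [if_neg (by rw [← pv_and128_mod]; simpa using hb)] at key
      have hv : ((Int.ofNat (2 * n)).emod 256).toNat = (2 * n) % 256 := by
        change (((2 * n : Nat) : Int) % 256).toNat = _; omega
      rw [hv, ← key]; omega
    · rw [if_pos (by simpa using hb), hxor]
      rw [if_pos (by rw [← pv_and128_mod]; simpa using hb)] at key
      have hv : ((Int.ofNat (2 * n ^^^ 213)).emod 256).toNat = (2 * n ^^^ 213) % 256 := by
        change (((2 * n ^^^ 213 : Nat) : Int) % 256).toNat = _; omega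
      rw [hv, pv_xor213_mod, ← key]
      congr 1
      omega
  | negSucc n =>
    have hm : ((Int.negSucc n).emod 256).toNat = 255 - n % 256 := by
      change ((-((n : Int) + 1)) % 256).toNat = _
      have : n % 256 < 256 := Nat.mod_lt _ (by norm_num)
      omega
    have hcond : PySem.Int.band (Int.negSucc n) 0x80 = Int.ofNat (128 - (128 &&& n)) := by
      rw [PySem.Int.band, if_neg (by simp [Int.negSucc_eq]; omega), if_pos (by norm_num)]
      have h1 : (-(Int.negSucc n) - 1).toNat = n := by simp [Int.negSucc_eq]
      have h2 : (0x80 : Int).toNat = 128 := rfl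
      rw [h1, h2]; rfl
    have hshift : (Int.negSucc n) <<< (1:Nat) = Int.negSucc (2 * n + 1) := by
      rw [Int.shiftLeft_eq]
      have h1 : Int.negSucc n = -((n : Int) + 1) := Int.negSucc_eq n
      have h2 : Int.negSucc (2 * n + 1) = -((2 * n + 1 : Nat) : Int) - 1 := by
        rw [Int.negSucc_eq]; push_cast; ring
      rw [h1, h2]; push_cast; ring
    have hxor : PySem.Int.bxor (Int.negSucc (2 * n + 1)) 0xD5
        = -(((2 * n + 1) ^^^ 213 : Nat) : Int) - 1 := by
      rw [PySem.Int.bxor, if_neg (by simp [Int.negSucc_eq]; omega), if_pos (by norm_num)]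
      have h1 : (-(Int.negSucc (2 * n + 1)) - 1).toNat = 2 * n + 1 := by
        simp [Int.negSucc_eq]; omega
      have h2 : (0xD5 : Int).toNat = 213 := rfl
      rw [h1, h2]
    have key : (if 128 - (128 &&& (n % 256)) ≠ 0 then 255 - ((2 * (n % 256) + 1) % 256 ^^^ 213)
          else 255 - (2 * (n % 256) + 1) % 256)
        = pvStepN (255 - n % 256) := pv_negKey ⟨n % 256, Nat.mod_lt _ (by norm_num)⟩
    have hand : 128 &&& n = 128 &&& n % 256 := by
      rw [Nat.and_comm 128 n, Nat.and_comm 128 (n % 256)]; exact pv_and128_mod n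
    rw [hm, pvStep, hcond, hshift]
    by_cases hb : 128 - (128 &&& n) = 0
    · rw [if_neg (by simpa using hb)]
      rw [if_neg (by rw [← hand]; simpa using hb)] at key
      have hmod : (2 * (n % 256) + 1) % 256 = (2 * n + 1) % 256 := by omega
      rw [hmod] at key
      rw [← key]
      have hv : ((Int.negSucc (2 * n + 1)).emod 256).toNat = 255 - (2 * n + 1) % 256 := by
        change ((-((2 * n + 1 : Nat) : Int) - 1 + 0) % 256).toNat = _
        have : (2 * n + 1) % 256 < 256 := Nat.mod_lt _ (by norm_num)
        push_cast
        omega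
      rw [hv]
    · rw [if_pos (by simpa using hb), hxor]
      rw [if_pos (by rw [← hand]; simpa using hb)] at key
      have hk2 : (2 * (n % 256) + 1) % 256 ^^^ 213 = ((2 * n + 1) ^^^ 213) % 256 := by
        rw [pv_xor213_mod]
        congr 1
        omega
      rw [hk2] at key
      rw [← key]
      generalize hg : ((2 * n + 1) ^^^ 213) = k at *
      have hv : ((-(k : Int) - 1).emod 256).toNat = 255 - k % 256 := by
        change ((-(k : Int) - 1) % 256).toNat = _
        have : k % 256 < 256 := Nat.mod_lt _ (by norm_num)
        omega
      rw [hv]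

theorem pv_loop_emod (c : Int) :
    (((List.range 8).foldl
      (fun c _ => if PySem.Int.band c 0x80 ≠ 0 then PySem.Int.bxor (c <<< (1:Nat)) 0xD5 else c <<< (1:Nat)) c).emod 256).toNat
    = pvStepN (pvStepN (pvStepN (pvStepN (pvStepN (pvStepN (pvStepN (pvStepN ((c.emod 256).toNat)))))))) := by
  show ((pvStep (pvStep (pvStep (pvStep (pvStep (pvStep (pvStep (pvStep c)))))))).emod 256).toNat = _
  rw [pv_step_emod, pv_step_emod, pv_step_emod, pv_step_emod,
      pv_step_emod, pv_step_emod, pv_step_emod, pv_step_emod]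

theorem pv_emod_toNat (y : Int) : y.emod 256 = (((y.emod 256).toNat : Nat) : Int) := by
  change y % 256 = (((y % 256).toNat : Nat) : Int)
  omega

-- ===== VERDICT (by name: the statement is the Claim_ definition above) =====
theorem crc8_dvb_s2_spec : Claim_equal_crc8_dvb_s2 := by
  intro crc a _
  unfold Spec_crc8_dvb_s2 crc8_dvb_s2 crc8_dvb_s2_alt
  show PySem.Int.band _ 0xFF = pvCrc8Table.getD _ 0
  set x := PySem.Int.bxor crc a with hx
  have hm : (PySem.Int.band x 0xFF).toNat = (x.emod 256).toNat := by rw [pv_band255]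
  have hlt : (x.emod 256).toNat < 256 := by
    have h1 : x.emod 256 < 256 := Int.emod_lt_of_pos _ (by norm_num)
    omega
  rw [hm]
  have htab : pvCrc8Table.getD ((x.emod 256).toNat) 0 = pvCrc8Byte ((x.emod 256).toNat) := by
    have hlen : ((x.emod 256).toNat) < pvCrc8Table.length := by
      simpa [pvCrc8Table] using hlt
    rw [List.getD_eq_getElem _ _ hlen]
    simp [pvCrc8Table]
  rw [htab]
  -- both sides are the low byte of the 8-step loop on (the low byte of) x
  show PySem.Int.band _ 255 = pvCrc8Byte _
  rw [pvCrc8Byte]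
  show _ = PySem.Int.band _ 255
  rw [pv_band255, pv_band255, pv_emod_toNat, pv_emod_toNat ((List.range 8).foldl _ (Int.ofNat (x.emod 256).toNat))]
  rw [pv_loop_emod, pv_loop_emod]
  have hfix : (((Int.ofNat (x.emod 256).toNat)).emod 256).toNat = (x.emod 256).toNat := by
    change ((((x.emod 256).toNat : Nat) : Int) % 256).toNat = _
    omega
  rw [hfix]
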